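-- pv_equiv track=rewrite | github.com/WebDevBernard/Python-Automations | py/auto_renewal_letter.py | format_policy_number
-- ===== SOURCE A (Python) =====
-- def format_policy_number(policy_number):
--     """Format policy number to remove spaces and ensure it contains both letters and numbers."""
--     if not policy_number:
--         return None
--
--     # Remove all spaces
--     cleaned = policy_number.replace(" ", "")
--
--     # Ensure it contains at least one number
--     if not any(char.isdigit() for char in cleaned):
--         return None
--
--     # Ensure it contains at least one letter
--     if not any(char.isalpha() for char in cleaned):
--         return None
--
--     return cleaned.upper()  # Optional: uppercase letters for consistency
-- ===== SOURCE B (Python) =====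
-- def format_policy_number(policy_number):
--     """Format policy number to remove spaces and ensure it contains both letters and numbers."""
--     if not policy_number:
--         return None
--     out = []
--     has_digit = False
--     has_alpha = False
--     for ch in policy_number:
--         if ch == " ":
--             continue
--         if ch.isdigit():
--             has_digit = True
--         elif ch.isalpha():
--             has_alpha = True
--         out.append(ch.upper())
--     if has_digit and has_alpha:
--         return "".join(out)
--     return None
-- ===== Notes on version B (the rewrite author's own statement) =====
-- stated objective: alternative
-- what changed: A makes four passes over the string (replace to strip spaces, two any(...) scans, then .upper()); B is one fused pass over the ORIGINAL string that skips spaces, classifies each character (digit / letter, mutually exclusive elif), and builds the uppercased output characters as it goes, joining them at the end.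
import Mathlib
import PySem

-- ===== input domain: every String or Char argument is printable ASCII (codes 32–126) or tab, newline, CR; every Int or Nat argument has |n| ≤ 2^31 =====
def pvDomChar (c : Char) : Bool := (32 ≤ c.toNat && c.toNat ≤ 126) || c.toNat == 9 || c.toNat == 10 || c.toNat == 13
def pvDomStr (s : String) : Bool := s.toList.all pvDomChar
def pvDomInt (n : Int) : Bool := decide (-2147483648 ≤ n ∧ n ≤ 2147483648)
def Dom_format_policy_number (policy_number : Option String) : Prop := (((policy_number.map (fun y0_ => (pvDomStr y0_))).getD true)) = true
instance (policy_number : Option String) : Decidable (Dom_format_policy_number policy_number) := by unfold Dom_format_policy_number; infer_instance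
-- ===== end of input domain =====

-- B replaces A's four staged passes (replace, two any(...) scans, upper) by ONE fused pass over
-- the original string that skips spaces, classifies each char and builds the uppercased output.

-- ===== PORT A =====
def format_policy_number (policy_number : Option String) : Option String :=
  match policy_number with
  | none => none
  | some s =>
    if s = "" then none
    else
      let cleaned := PySem.Str.replace s " " ""
      if ¬ (cleaned.toList.any PySem.Chars.isdigit) then none
      else if ¬ (cleaned.toList.any PySem.Chars.isalpha) then none
      else some (PySem.Str.upper cleaned)

-- ===== PORT B =====
-- Source B's single for-loop: state = (out chars built so far, has_digit, has_alpha);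
-- spaces are skipped, digit/letter classified by an elif, ch.upper() appended as we go.
def pvStep (st : List Char × Bool × Bool) (c : Char) : List Char × Bool × Bool :=
  if c = ' ' then st
  else
    let d := if PySem.Chars.isdigit c then true else st.2.1
    let a := if PySem.Chars.isdigit c then st.2.2
             else if PySem.Chars.isalpha c then true else st.2.2
    (st.1 ++ [PySem.Chars.upperChar c], d, a)

def format_policy_number_alt (policy_number : Option String) : Option String :=
  match policy_number with
  | none => none
  | some s =>
    if s = "" then none
    else
      let st := s.toList.foldl pvStep ([], false, false)
      if st.2.1 && st.2.2 then some (String.ofList st.1) else none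

-- ===== PRECONDITION & SPEC =====
def Spec_format_policy_number (policy_number : Option String) (out : Option String) : Prop := out = format_policy_number_alt policy_number
instance (policy_number : Option String) (out : Option String) : Decidable (Spec_format_policy_number policy_number out) := by unfold Spec_format_policy_number; infer_instance

-- ===== CLAIM (what is proved, stated in full; the proofs are below) =====
def Claim_equal_format_policy_number : Prop := ∀ (policy_number : Option String), Dom_format_policy_number policy_number → Spec_format_policy_number policy_number (format_policy_number policy_number)

-- ===== LEMMAS AND PROOFS =====

-- A's cleaned string: removing the single char ' ' with replace is filtering it out
theorem pvReplace_go_space (l acc : List Char) :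
    PySem.Chars.replace.go [' '] [] l.length l acc = acc.reverse ++ l.filter (· ≠ ' ') := by
  induction l generalizing acc with
  | nil => simp [PySem.Chars.replace.go]
  | cons c t ih =>
    rw [List.length_cons, PySem.Chars.replace.go]
    by_cases h : c = ' '
    · subst h; simp [List.isPrefixOf, ih]
    · simp [List.isPrefixOf, Ne.symm h, h, ih]

theorem pvReplace_space (l : List Char) :
    PySem.Chars.replace l [' '] [] = l.filter (· ≠ ' ') := by
  simpa [PySem.Chars.replace] using pvReplace_go_space l []

-- a char is never both a digit and a letter
theorem pv_not_digit_alpha (c : Char) (h : PySem.Chars.isdigit c = true) :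
    PySem.Chars.isalpha c = false := by
  simp [PySem.Chars.isdigit] at h
  simp [PySem.Chars.isalpha, PySem.Chars.isupper, PySem.Chars.islower]
  obtain ⟨h1, h2⟩ := h
  simp only [Char.le_def, Char.lt_def, UInt32.le_iff_toNat_le, UInt32.lt_iff_toNat_lt,
    show '0'.val.toNat = 48 from rfl, show '9'.val.toNat = 57 from rfl,
    show 'A'.val.toNat = 65 from rfl, show 'Z'.val.toNat = 90 from rfl,
    show 'a'.val.toNat = 97 from rfl, show 'z'.val.toNat = 122 from rfl] at *
  constructor <;> intro <;> omega

-- B's fold computes A's three staged passes over the space-filtered list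
theorem pvStep_foldl (cs : List Char) (out : List Char) (d a : Bool) :
    cs.foldl pvStep (out, d, a) =
      (out ++ (cs.filter (· ≠ ' ')).map PySem.Chars.upperChar,
       d || (cs.filter (· ≠ ' ')).any PySem.Chars.isdigit,
       a || (cs.filter (· ≠ ' ')).any PySem.Chars.isalpha) := by
  induction cs generalizing out d a with
  | nil => simp
  | cons c t ih =>
    by_cases hsp : c = ' '
    · subst hsp; simpa [pvStep] using ih out d a
    · by_cases hd : PySem.Chars.isdigit c = true
      · simp [pvStep, hsp, hd, ih, pv_not_digit_alpha c hd]
      · simp only [Bool.not_eq_true] at hd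
        cases ha : PySem.Chars.isalpha c <;>
          simp [pvStep, hsp, hd, ha, ih]

-- ===== VERDICT (by name: the statement is the Claim_ definition above) =====
theorem format_policy_number_spec : Claim_equal_format_policy_number := by
  intro pn _
  unfold Spec_format_policy_number format_policy_number format_policy_number_alt
  cases pn with
  | none => rfl
  | some s =>
    simp only []
    split
    · rfl
    · rw [pvStep_foldl]
      have hcl : (PySem.Str.replace s " " "").toList = s.toList.filter (· ≠ ' ') := by
        rw [PySem.Str.toList_replace]
        simpa using pvReplace_space s.toList
      simp only [Bool.false_or, hcl]
      cases hd : (s.toList.filter (· ≠ ' ')).any PySem.Chars.isdigit <;>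
      cases ha : (s.toList.filter (· ≠ ' ')).any PySem.Chars.isalpha <;>
        simp [PySem.Str.upper, PySem.Chars.upper, hcl]
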